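-- pv_equiv track=rewrite | github.com/RahulG1309/AOC23 | day_3/main.py | get_matrix_row
-- ===== SOURCE A (Python) =====
-- from typing import List
--
-- def get_matrix_row(raw_string: str) -> List[str]:
--     row = [raw_string[0]]
--
--     for i in range(1, len(raw_string)):
--         cur = raw_string[i]
--         prev = row[-1]
--
--         if cur.isdigit():
--             if prev.isdigit():
--                 row.append(prev + cur)  # Build up the number
--                 row[-2] = "x"
--                 continue
--
--         row.append(cur)
--     return row
-- ===== SOURCE B (Python) =====
-- def get_matrix_row(raw_string):
--     # Run-scan: consume each maximal digit run in one step (two pointers),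
--     # emitting len(run)-1 'x' placeholders followed by the full number.
--     row = []
--     i = 0
--     n = len(raw_string)
--     while i < n:
--         if raw_string[i].isdigit():
--             j = i
--             while j < n and raw_string[j].isdigit():
--                 j += 1
--             row.extend("x" * (j - i - 1))
--             row.append(raw_string[i:j])
--             i = j
--         else:
--             row.append(raw_string[i])
--             i += 1
--     return row
-- ===== Notes on version B (the rewrite author's own statement) =====
-- stated objective: alternative
-- what changed: B replaces A's char-by-char scan that back-patches the previous row entry (row[-2] = 'x') with a two-pointer run scan that consumes each maximal digit run at once and emits len(run)-1 placeholder marks followed by the full number; Pre_ excludes only the empty string, on which A raises IndexError.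
import Mathlib
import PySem

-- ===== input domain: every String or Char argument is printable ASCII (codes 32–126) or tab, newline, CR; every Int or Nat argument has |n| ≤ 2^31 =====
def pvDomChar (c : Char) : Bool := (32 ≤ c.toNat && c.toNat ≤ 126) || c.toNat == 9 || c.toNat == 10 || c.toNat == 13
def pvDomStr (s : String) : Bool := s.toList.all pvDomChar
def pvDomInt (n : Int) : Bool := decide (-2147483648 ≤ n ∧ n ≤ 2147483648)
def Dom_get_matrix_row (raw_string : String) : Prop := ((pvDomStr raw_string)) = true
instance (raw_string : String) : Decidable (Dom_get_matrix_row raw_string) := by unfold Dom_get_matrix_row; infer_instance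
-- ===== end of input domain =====

-- B replaces A's back-patching scan (row[-2] = "x") by a two-pointer run scan over maximal
-- digit runs; same return value on every nonempty string (A raises IndexError on "").

-- ===== PORT A =====
-- loop body: cur = s[i]; prev = row[-1]; if cur.isdigit() and prev.isdigit():
--   row.append(prev + cur); row[-2] = "x"  else: row.append(cur)
def aStep (row : List String) (cur : Char) : List String :=
  let prev := PySem.List.pyGetD row (-1) ""   -- row[-1]; row is never empty, IndexError impossible
  if PySem.Chars.isdigit cur then
    if PySem.Str.strIsdigit prev then
      PySem.List.pySetD (row ++ [prev.push cur]) (-2) "x"  -- row.append(prev + cur); row[-2] = "x"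
    else row ++ [String.singleton cur]
  else row ++ [String.singleton cur]

def get_matrix_row (raw_string : String) : List String :=
  match raw_string.toList with
  | [] => []  -- raw_string[0] raises IndexError here; excluded by Pre_
  | c :: cs => cs.foldl aStep [String.singleton c]  -- row = [raw_string[0]]; for i in range(1, len)

-- ===== PORT B =====
-- while i < n: if s[i].isdigit(): advance j over the run (inner while = takeWhile/dropWhile),
-- extend with "x" * (j-i-1), append s[i:j]; else append s[i].  fuel = remaining length bound.
def altGo : Nat → List Char → List String
  | _, [] => []
  | 0, _ :: _ => []  -- unreachable: fuel starts at the list length and never runs out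
  | fuel + 1, c :: cs =>
    if PySem.Chars.isdigit c then
      let run := c :: cs.takeWhile PySem.Chars.isdigit
      let rest := cs.dropWhile PySem.Chars.isdigit
      List.replicate (run.length - 1) "x" ++ String.ofList run :: altGo fuel rest
    else
      String.singleton c :: altGo fuel cs

def get_matrix_row_alt (raw_string : String) : List String :=
  altGo raw_string.toList.length raw_string.toList

-- ===== PRECONDITION & SPEC =====
-- Pre_ excludes only the empty string, on which A raises IndexError at raw_string[0].
def Pre_get_matrix_row (raw_string : String) : Prop := raw_string ≠ ""
instance (raw_string : String) : Decidable (Pre_get_matrix_row raw_string) := by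
  unfold Pre_get_matrix_row; infer_instance

def pvWitness_get_matrix_row : String := "467..114*"

def Spec_get_matrix_row (raw_string : String) (out : List String) : Prop :=
  out = get_matrix_row_alt raw_string
instance (raw_string : String) (out : List String) : Decidable (Spec_get_matrix_row raw_string out) := by
  unfold Spec_get_matrix_row; infer_instance

-- ===== CLAIM (what is proved, stated in full; the proofs are below) =====
def Claim_equal_get_matrix_row : Prop := ∀ (raw_string : String), Dom_get_matrix_row raw_string → Pre_get_matrix_row raw_string → Spec_get_matrix_row raw_string (get_matrix_row raw_string)

-- ===== LEMMAS AND PROOFS =====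

-- proof-side abbreviation: altGo run with exactly enough fuel
def AG (l : List Char) : List String := altGo l.length l

lemma altGo_fuel : ∀ (f1 f2 : Nat) (l : List Char), l.length ≤ f1 → l.length ≤ f2 →
    altGo f1 l = altGo f2 l := by
  intro f1
  induction f1 with
  | zero =>
    intro f2 l h1 _
    have : l = [] := List.eq_nil_of_length_eq_zero (Nat.le_zero.mp h1)
    subst this; cases f2 <;> rfl
  | succ f ih =>
    intro f2 l h1 h2
    cases l with
    | nil => cases f2 <;> rfl
    | cons c cs =>
      cases f2 with
      | zero => simp at h2
      | succ g =>
        simp only [altGo]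
        by_cases hc : PySem.Chars.isdigit c
        · simp only [hc, if_pos]
          have hlen : (cs.dropWhile PySem.Chars.isdigit).length ≤ cs.length :=
            cs.length_dropWhile_le _
          rw [ih g _ (by simp at h1; omega) (by simp at h2; omega)]
        · simp only [hc, if_neg, Bool.false_eq_true, not_false_iff]
          rw [ih g cs (by simp at h1; omega) (by simp at h2; omega)]

lemma AG_nil : AG [] = [] := rfl

lemma AG_cons_digit (c : Char) (cs : List Char) (h : PySem.Chars.isdigit c = true) :
    AG (c :: cs) = List.replicate ((c :: cs.takeWhile PySem.Chars.isdigit).length - 1) "x" ++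
      String.ofList (c :: cs.takeWhile PySem.Chars.isdigit) :: AG (cs.dropWhile PySem.Chars.isdigit) := by
  show altGo (cs.length + 1) (c :: cs) = _
  simp only [altGo, h, if_pos]
  rw [altGo_fuel cs.length _ _ (cs.length_dropWhile_le _) (le_refl _)]
  rfl

lemma AG_cons_nondigit (c : Char) (cs : List Char) (h : ¬ PySem.Chars.isdigit c = true) :
    AG (c :: cs) = String.singleton c :: AG cs := by
  show altGo (cs.length + 1) (c :: cs) = _
  simp only [altGo, h, if_neg, not_false_iff]
  rfl

lemma strIsdigit_singleton (c : Char) :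
    PySem.Str.strIsdigit (String.singleton c) = PySem.Chars.isdigit c := by
  simp [PySem.Str.strIsdigit_eq, PySem.Chars.strIsdigit]

lemma strIsdigit_mk (r : List Char) (h : r ≠ []) (hall : ∀ a ∈ r, PySem.Chars.isdigit a = true) :
    PySem.Str.strIsdigit (String.ofList r) = true := by
  simp only [PySem.Str.strIsdigit_eq, PySem.Chars.strIsdigit, String.toList_ofList]
  simp [List.isEmpty_eq_false_iff.mpr h]
  exact hall

lemma mk_push (r : List Char) (c : Char) : (String.ofList r).push c = String.ofList (r ++ [c]) := by
  simp [← String.toList_inj]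

lemma singleton_eq_mk (c : Char) : String.singleton c = String.ofList [c] := by
  simp [← String.toList_inj]

lemma pySetD_penult (acc : List String) (s t x : String) :
    PySem.List.pySetD (acc ++ [s, t]) (-2) x = acc ++ [x, t] := by
  induction acc with
  | nil => rfl
  | cons a acc ih =>
    simp only [PySem.List.pySetD, PySem.List.pySet?, PySem.List.pyIdx?] at *
    simp only [List.cons_append, List.length_cons, List.length_append] at *
    norm_num at *
    have h2 : Int.toNat 2 = 2 := rfl
    rw [h2] at ih ⊢
    have h3 : acc.length + 2 + 1 - 2 = (acc.length + 2 - 2) + 1 := by omega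
    rw [h3, List.set_cons_succ, ih]

lemma aStep_concat (acc : List String) (s : String) (c : Char) :
    aStep (acc ++ [s]) c =
      if PySem.Chars.isdigit c && PySem.Str.strIsdigit s then acc ++ ["x", s.push c]
      else acc ++ [s, String.singleton c] := by
  unfold aStep
  rw [PySem.List.pyGetD_neg_one_append_singleton]
  by_cases h1 : PySem.Chars.isdigit c <;> by_cases h2 : PySem.Str.strIsdigit s <;>
    simp only [h1, h2, if_pos, if_neg, Bool.true_and, Bool.false_and, Bool.and_self,
      Bool.false_eq_true, not_false_iff, if_true, if_false, List.append_assoc,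
      List.singleton_append, List.cons_append, List.nil_append]
  exact pySetD_penult acc s (s.push c) "x"

lemma takeWhile_all_append (r l : List Char) (h : ∀ a ∈ r, PySem.Chars.isdigit a = true) :
    (r ++ l).takeWhile PySem.Chars.isdigit = r ++ l.takeWhile PySem.Chars.isdigit ∧
    (r ++ l).dropWhile PySem.Chars.isdigit = l.dropWhile PySem.Chars.isdigit := by
  induction r with
  | nil => simp
  | cons a r ih =>
    have ha : PySem.Chars.isdigit a = true := h a (by simp)
    have := ih (fun b hb => h b (by simp [hb]))
    simp [List.takeWhile, List.dropWhile, ha, this.1, this.2]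

lemma main_conj (cs : List Char) :
    (∀ (acc : List String) (r : List Char), r ≠ [] → (∀ a ∈ r, PySem.Chars.isdigit a = true) →
       List.foldl aStep (acc ++ (List.replicate (r.length - 1) "x" ++ [String.ofList r])) cs
         = acc ++ AG (r ++ cs))
  ∧ (∀ (acc : List String) (s : String), PySem.Str.strIsdigit s = false →
       List.foldl aStep (acc ++ [s]) cs = (acc ++ [s]) ++ AG cs) := by
  induction cs with
  | nil =>
    constructor
    · intro acc r hr hall
      obtain ⟨r0, rt, rfl⟩ := List.exists_cons_of_ne_nil hr
      have h0 : PySem.Chars.isdigit r0 = true := hall r0 (by simp)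
      have htw : rt.takeWhile PySem.Chars.isdigit = rt ∧
          rt.dropWhile PySem.Chars.isdigit = [] := by
        have := takeWhile_all_append rt [] (fun a ha => hall a (by simp [ha]))
        simpa using this
      simp only [List.foldl_nil, List.append_nil, AG_cons_digit r0 rt h0, htw.1, htw.2, AG_nil]
    · intro acc s _
      simp [AG_nil]
  | cons c cs ih =>
    constructor
    · intro acc r hr hall
      obtain ⟨r0, rt, hr0⟩ := List.exists_cons_of_ne_nil hr
      have hmk : PySem.Str.strIsdigit (String.ofList r) = true := strIsdigit_mk r hr hall
      have hseed : acc ++ (List.replicate (r.length - 1) "x" ++ [String.ofList r])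
          = (acc ++ List.replicate (r.length - 1) "x") ++ [String.ofList r] := by simp
      rw [List.foldl_cons, hseed, aStep_concat]
      by_cases hc : PySem.Chars.isdigit c
      · simp only [hc, hmk, Bool.and_self, if_pos, Bool.true_and, if_true]
        have hx : (acc ++ List.replicate (r.length - 1) "x") ++ ["x", (String.ofList r).push c]
            = acc ++ (List.replicate ((r ++ [c]).length - 1) "x" ++ [String.ofList (r ++ [c])]) := by
          rw [mk_push]
          have hlen : (r ++ [c]).length - 1 = (r.length - 1) + 1 := by
            obtain ⟨_, _, rfl⟩ := List.exists_cons_of_ne_nil hr; simp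
          rw [hlen, List.replicate_succ']
          simp
        rw [hx, (ih).1 acc (r ++ [c]) (by simp)
          (by intro a ha; rcases List.mem_append.mp ha with h | h
              · exact hall a h
              · simp at h; subst h; exact hc)]
        simp
      · simp only [hc, Bool.false_and, Bool.false_eq_true, if_neg, not_false_iff, if_false]
        have hx : (acc ++ List.replicate (r.length - 1) "x") ++ [String.ofList r, String.singleton c]
            = ((acc ++ (List.replicate (r.length - 1) "x" ++ [String.ofList r])) ++ [String.singleton c]) := by
          simp
        rw [hx, (ih).2 _ (String.singleton c) (by rw [strIsdigit_singleton]; simpa using hc)]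
        subst hr0
        have h0 : PySem.Chars.isdigit r0 = true := hall r0 (by simp)
        have htw := takeWhile_all_append rt (c :: cs) (fun a ha => hall a (by simp [ha]))
        have htc : (c :: cs).takeWhile PySem.Chars.isdigit = [] := by
          simp [List.takeWhile, hc]
        have hdc : (c :: cs).dropWhile PySem.Chars.isdigit = c :: cs := by
          simp [List.dropWhile, hc]
        rw [show (r0 :: rt) ++ c :: cs = r0 :: (rt ++ c :: cs) by simp,
          AG_cons_digit r0 (rt ++ c :: cs) h0, htw.1, htw.2, htc, hdc,
          AG_cons_nondigit c cs hc]
        simp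
    · intro acc s hs
      rw [List.foldl_cons, aStep_concat]
      simp only [hs, Bool.and_false, Bool.false_eq_true, if_neg, not_false_iff, if_false]
      by_cases hc : PySem.Chars.isdigit c
      · have hx : acc ++ [s, String.singleton c]
            = (acc ++ [s]) ++ (List.replicate (([c] : List Char).length - 1) "x" ++ [String.ofList [c]]) := by
          simp [singleton_eq_mk]
        rw [hx, (ih).1 (acc ++ [s]) [c] (by simp) (by simpa using hc)]
        simp
      · have hx : acc ++ [s, String.singleton c] = ((acc ++ [s]) ++ [String.singleton c]) := by simp
        rw [hx, (ih).2 (acc ++ [s]) (String.singleton c)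
          (by rw [strIsdigit_singleton]; simpa using hc)]
        rw [AG_cons_nondigit c cs hc]
        simp

-- ===== VERDICT (by name: the statement is the Claim_ definition above) =====
theorem get_matrix_row_spec : Claim_equal_get_matrix_row := by
  intro s _ hpre
  unfold Spec_get_matrix_row get_matrix_row get_matrix_row_alt
  have hne : s.toList ≠ [] := by
    intro h
    exact hpre (by cases s; simp_all)
  obtain ⟨c, cs, hcc⟩ := List.exists_cons_of_ne_nil hne
  rw [hcc]
  show List.foldl aStep [String.singleton c] cs = altGo (c :: cs).length (c :: cs)
  have halt : altGo (c :: cs).length (c :: cs) = AG (c :: cs) := rfl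
  rw [halt]
  by_cases hc : PySem.Chars.isdigit c
  · have := (main_conj cs).1 [] [c] (by simp) (by simpa using hc)
    simpa [singleton_eq_mk] using this
  · have := (main_conj cs).2 [] (String.singleton c) (by rw [strIsdigit_singleton]; simpa using hc)
    rw [show ([] : List String) ++ [String.singleton c] = [String.singleton c] by simp] at this
    rw [this, AG_cons_nondigit c cs hc]
    simp
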